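-- pv_equiv track=rewrite | github.com/Ohjiwoo-lab/Baekjoon_study | 프로그래머스/unrated/181890. 왼쪽 오른쪽/왼쪽 오른쪽.py | solution
-- ===== SOURCE A (Python) =====
-- def solution(str_list):
--     answer = []
--
--     for i, str in enumerate(str_list):
--         if str == "r":
--             answer = str_list[i+1:]
--             break
--         elif str == "l":
--             answer = str_list[:i]
--             break
--
--     return answer
-- ===== SOURCE B (Python) =====
-- def solution(str_list):
--     n = len(str_list)
--     try:
--         il = str_list.index("l")
--     except ValueError:
--         il = n
--     try:
--         ir = str_list.index("r")
--     except ValueError: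
--         ir = n
--     if il == n and ir == n:
--         return []
--     if il < ir:
--         return str_list[:il]
--     return str_list[ir + 1:]
-- ===== Notes on version B (the rewrite author's own statement) =====
-- stated objective: alternative
-- what changed: Replaces the single interleaved early-exit loop with two independent first-index lookups (index of 'l' and of 'r' with length as the absent sentinel) followed by a comparison that picks the slice.
import Mathlib
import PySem

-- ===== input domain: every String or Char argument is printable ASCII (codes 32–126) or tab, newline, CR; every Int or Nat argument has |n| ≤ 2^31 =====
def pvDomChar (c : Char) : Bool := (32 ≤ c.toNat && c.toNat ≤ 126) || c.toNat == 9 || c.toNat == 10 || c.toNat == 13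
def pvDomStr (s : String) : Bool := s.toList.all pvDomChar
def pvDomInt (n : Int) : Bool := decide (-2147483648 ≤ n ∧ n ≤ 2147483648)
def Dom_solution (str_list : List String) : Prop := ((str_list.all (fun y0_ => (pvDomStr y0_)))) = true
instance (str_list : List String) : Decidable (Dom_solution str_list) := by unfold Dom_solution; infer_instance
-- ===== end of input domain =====

-- B replaces A's single interleaved early-exit loop by two independent first-index
-- lookups ("l" and "r", with the length as absent sentinel) plus a comparison
-- choosing the slice (objective: alternative decomposition, same O(n) cost).

-- ===== PORT A =====
-- A's loop over enumerate(str_list) with an early break; `full` is the original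
-- list being sliced, `i` the enumerate counter (always ≥ 0 in Python, hence Nat;
-- the slices str_list[i+1:] / str_list[:i] with 0 ≤ i are exactly drop / take).
def solGo (full : List String) (i : Nat) : List String → List String
  | [] => []
  | s :: t =>
    if s = "r" then full.drop (i + 1)
    else if s = "l" then full.take i
    else solGo full (i + 1) t

def solution (str_list : List String) : List String :=
  solGo str_list 0 str_list

-- ===== PORT B =====
-- Source B's str_list.index(c) wrapped in try/except ValueError with default n is
-- exactly List.idxOf (returns the length when absent).
def solution_alt (str_list : List String) : List String :=
  let n := str_list.length
  let il := str_list.idxOf "l"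
  let ir := str_list.idxOf "r"
  if il = n ∧ ir = n then []
  else if il < ir then str_list.take il
  else str_list.drop (ir + 1)

-- ===== PRECONDITION & SPEC =====
def Spec_solution (str_list : List String) (out : List String) : Prop := out = solution_alt str_list
instance (str_list : List String) (out : List String) : Decidable (Spec_solution str_list out) := by unfold Spec_solution; infer_instance

-- ===== CLAIM (what is proved, stated in full; the proofs are below) =====
def Claim_equal_solution : Prop := ∀ (str_list : List String), Dom_solution str_list → Spec_solution str_list (solution str_list)

-- ===== LEMMAS AND PROOFS =====

-- The loop invariant: the elements already passed (the prefix `pre`) contain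
-- neither "l" nor "r", and the loop continues on the suffix `rest`.
lemma go_eq (rest : List String) : ∀ (pre : List String),
    "l" ∉ pre → "r" ∉ pre →
    solGo (pre ++ rest) pre.length rest = solution_alt (pre ++ rest) := by
  induction rest with
  | nil =>
    intro pre hl hr
    simp [solGo, solution_alt, List.idxOf_eq_length_iff.mpr hl,
      List.idxOf_eq_length_iff.mpr hr]
  | cons s t ih =>
    intro pre hl hr
    by_cases hs1 : s = "r"
    · subst hs1
      have hn : (pre ++ "r" :: t).length = pre.length + t.length + 1 := by
        simp [List.length_append]; omega
      have hir : List.idxOf "r" (pre ++ "r" :: t) = pre.length := by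
        simp [List.idxOf_append, hr]
      have hil : List.idxOf "l" (pre ++ "r" :: t)
          = List.idxOf "l" t + 1 + pre.length := by
        simp [List.idxOf_append, hl]
      have hA : solGo (pre ++ "r" :: t) pre.length ("r" :: t)
          = (pre ++ "r" :: t).drop (pre.length + 1) := by
        simp [solGo]
      rw [hA]
      simp only [solution_alt, hir, hil]
      rw [hn, if_neg (by omega), if_neg (by omega)]
    · by_cases hs2 : s = "l"
      · subst hs2
        have hn : (pre ++ "l" :: t).length = pre.length + t.length + 1 := by
          simp [List.length_append]; omega
        have hil : List.idxOf "l" (pre ++ "l" :: t) = pre.length := by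
          simp [List.idxOf_append, hl]
        have hir : List.idxOf "r" (pre ++ "l" :: t)
            = List.idxOf "r" t + 1 + pre.length := by
          simp [List.idxOf_append, hr]
        have hA : solGo (pre ++ "l" :: t) pre.length ("l" :: t)
            = (pre ++ "l" :: t).take pre.length := by
          simp [solGo]
        rw [hA]
        simp only [solution_alt, hil, hir]
        rw [hn, if_neg (by omega), if_pos (by omega), List.take_left]
      · have hl' : "l" ∉ pre ++ [s] := by
          intro h
          rcases List.mem_append.mp h with h | h
          · exact hl h
          · exact hs2 (List.mem_singleton.mp h).symm
        have hr' : "r" ∉ pre ++ [s] := by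
          intro h
          rcases List.mem_append.mp h with h | h
          · exact hr h
          · exact hs1 (List.mem_singleton.mp h).symm
        have hA : solGo (pre ++ s :: t) pre.length (s :: t)
            = solGo (pre ++ s :: t) (pre.length + 1) t := by
          simp [solGo, hs1, hs2]
        rw [hA, show pre ++ s :: t = (pre ++ [s]) ++ t by simp,
          show pre.length + 1 = (pre ++ [s]).length by simp]
        exact ih (pre ++ [s]) hl' hr'

-- ===== VERDICT (by name: the statement is the Claim_ definition above) =====
theorem solution_spec : Claim_equal_solution := by
  intro str_list _
  unfold Spec_solution solution
  simpa using go_eq str_list [] (by simp) (by simp)
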